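-- pv_equiv track=rewrite | github.com/Clamepending/semantic-autogaze | semantic_autogaze/analyze_mild_keep_sweep.py | paired_flip
-- ===== SOURCE A (Python) =====
-- def paired_flip(a_map, b_map):
--     shared = sorted(set(a_map.keys()) & set(b_map.keys()))
--     a_wins = b_wins = both_ok = both_wrong = 0
--     for q in shared:
--         a, b = a_map[q], b_map[q]
--         if a and not b:
--             a_wins += 1
--         elif b and not a:
--             b_wins += 1
--         elif a and b:
--             both_ok += 1
--         else:
--             both_wrong += 1
--     return a_wins, b_wins, both_ok, both_wrong, len(shared)
-- ===== SOURCE B (Python) =====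
-- def paired_flip(a_map, b_map):
--     shared = set(a_map) & set(b_map)
--     n = len(shared)
--     ca = sum(1 for q in shared if a_map[q])
--     cb = sum(1 for q in shared if b_map[q])
--     both_ok = sum(1 for q in shared if a_map[q] and b_map[q])
--     return ca - both_ok, cb - both_ok, both_ok, n - ca - cb + both_ok, n
-- ===== Notes on version B (the rewrite author's own statement) =====
-- stated objective: alternative
-- what changed: Replaces the sorted loop with a four-way if/elif chain by unsorted marginal counts (truthy in a, truthy in b, truthy in both) from which all four categories are derived by inclusion-exclusion arithmetic.
import Mathlib
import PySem

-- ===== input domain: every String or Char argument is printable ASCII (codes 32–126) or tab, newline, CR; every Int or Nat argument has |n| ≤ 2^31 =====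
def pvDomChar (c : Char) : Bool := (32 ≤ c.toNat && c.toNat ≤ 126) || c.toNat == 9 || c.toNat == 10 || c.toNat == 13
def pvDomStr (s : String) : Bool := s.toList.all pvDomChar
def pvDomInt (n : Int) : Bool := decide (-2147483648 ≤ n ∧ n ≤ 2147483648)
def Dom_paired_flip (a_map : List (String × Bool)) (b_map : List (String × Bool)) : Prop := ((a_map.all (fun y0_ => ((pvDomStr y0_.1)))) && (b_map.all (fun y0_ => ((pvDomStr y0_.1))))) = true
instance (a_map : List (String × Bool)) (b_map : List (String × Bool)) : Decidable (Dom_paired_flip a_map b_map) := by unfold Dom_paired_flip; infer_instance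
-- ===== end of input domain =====

-- B changes the decomposition: instead of A's sorted loop with a four-way branch, B counts
-- marginals over the unsorted shared keys and derives the four categories arithmetically.

-- ===== PORT A =====
def paired_flip (a_map : List (String × Bool)) (b_map : List (String × Bool)) : List Int :=
  let da := PySem.Dict.ofList a_map
  let db := PySem.Dict.ofList b_map
  let shared := PySem.List.sorted (PySem.Set.inter (PySem.Set.ofList da.keys) db.keys) (fun x => x) false
  let st := shared.foldl (fun (st : Int × Int × Int × Int) q =>
    let a := da.getD q false
    let b := db.getD q false
    if a && !b then (st.1 + 1, st.2.1, st.2.2.1, st.2.2.2)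
    else if b && !a then (st.1, st.2.1 + 1, st.2.2.1, st.2.2.2)
    else if a && b then (st.1, st.2.1, st.2.2.1 + 1, st.2.2.2)
    else (st.1, st.2.1, st.2.2.1, st.2.2.2 + 1)) (0, 0, 0, 0)
  [st.1, st.2.1, st.2.2.1, st.2.2.2, (shared.length : Int)]

-- ===== PORT B =====
def paired_flip_alt (a_map : List (String × Bool)) (b_map : List (String × Bool)) : List Int :=
  let da := PySem.Dict.ofList a_map
  let db := PySem.Dict.ofList b_map
  let shared := PySem.Set.inter (PySem.Set.ofList da.keys) db.keys
  let n : Int := shared.length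
  let ca : Int := shared.countP (fun q => da.getD q false)
  let cb : Int := shared.countP (fun q => db.getD q false)
  let both_ok : Int := shared.countP (fun q => da.getD q false && db.getD q false)
  [ca - both_ok, cb - both_ok, both_ok, n - ca - cb + both_ok, n]

-- ===== PRECONDITION & SPEC =====
def Spec_paired_flip (a_map : List (String × Bool)) (b_map : List (String × Bool)) (out : List Int) : Prop := out = paired_flip_alt a_map b_map
instance (a_map : List (String × Bool)) (b_map : List (String × Bool)) (out : List Int) : Decidable (Spec_paired_flip a_map b_map out) := by unfold Spec_paired_flip; infer_instance

-- ===== CLAIM (what is proved, stated in full; the proofs are below) =====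
def Claim_equal_paired_flip : Prop := ∀ (a_map : List (String × Bool)) (b_map : List (String × Bool)), Dom_paired_flip a_map b_map → Spec_paired_flip a_map b_map (paired_flip a_map b_map)

-- ===== LEMMAS AND PROOFS =====

-- A's four-counter fold computes the four disjoint countP's.
theorem pv_fold_counts (f g : String → Bool) (l : List String) (s : Int × Int × Int × Int) :
    l.foldl (fun (st : Int × Int × Int × Int) q =>
      let a := f q
      let b := g q
      if a && !b then (st.1 + 1, st.2.1, st.2.2.1, st.2.2.2)
      else if b && !a then (st.1, st.2.1 + 1, st.2.2.1, st.2.2.2)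
      else if a && b then (st.1, st.2.1, st.2.2.1 + 1, st.2.2.2)
      else (st.1, st.2.1, st.2.2.1, st.2.2.2 + 1)) s
    = (s.1 + (l.countP (fun q => f q && !g q) : Int),
       s.2.1 + (l.countP (fun q => g q && !f q) : Int),
       s.2.2.1 + (l.countP (fun q => f q && g q) : Int),
       s.2.2.2 + (l.countP (fun q => !f q && !g q) : Int)) := by
  induction l generalizing s with
  | nil => simp
  | cons x t ih =>
    simp only [List.foldl_cons, List.countP_cons, ih]
    cases hf : f x <;> cases hg : g x <;> simp [Prod.ext_iff] <;> omega

-- four-way partition of the counts, as integers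
theorem pv_count_arith (f g : String → Bool) (l : List String) :
    ((l.countP (fun q => f q && !g q) : Int)
      = (l.countP f : Int) - (l.countP (fun q => f q && g q) : Int))
    ∧ ((l.countP (fun q => g q && !f q) : Int)
      = (l.countP g : Int) - (l.countP (fun q => f q && g q) : Int))
    ∧ ((l.countP (fun q => !f q && !g q) : Int)
      = (l.length : Int) - (l.countP f : Int) - (l.countP g : Int)
        + (l.countP (fun q => f q && g q) : Int)) := by
  induction l with
  | nil => simp
  | cons x t ih =>
    obtain ⟨h1, h2, h3⟩ := ih
    simp only [List.countP_cons, List.length_cons]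
    cases hf : f x <;> cases hg : g x <;> simp <;> omega

theorem pv_countP_sorted (p : String → Bool) (S : List String) :
    (PySem.List.sorted S (fun x => x) false).countP p = S.countP p :=
  (PySem.List.sorted_perm S (fun x => x) false).countP_eq p

theorem pv_length_sorted (S : List String) :
    (PySem.List.sorted S (fun x => x) false).length = S.length :=
  (PySem.List.sorted_perm S (fun x => x) false).length_eq

theorem paired_flip_eq (a_map : List (String × Bool)) (b_map : List (String × Bool)) :
    paired_flip a_map b_map = paired_flip_alt a_map b_map := by
  unfold paired_flip paired_flip_alt
  simp only [pv_fold_counts, pv_countP_sorted, pv_length_sorted, zero_add]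
  obtain ⟨h1, h2, h3⟩ := pv_count_arith
    (fun q => (PySem.Dict.ofList a_map).getD q false)
    (fun q => (PySem.Dict.ofList b_map).getD q false)
    (PySem.Set.inter (PySem.Set.ofList (PySem.Dict.ofList a_map).keys) (PySem.Dict.ofList b_map).keys)
  simp only [List.cons.injEq, and_true]
  exact ⟨h1, h2, trivial, h3⟩

-- ===== VERDICT (by name: the statement is the Claim_ definition above) =====
theorem paired_flip_spec : Claim_equal_paired_flip := by
  intro a_map b_map _
  unfold Spec_paired_flip
  exact paired_flip_eq a_map b_map
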